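-- pv_equiv track=rewrite | github.com/pypi-data/pypi-mirror-50 | packages/midtools/midtools-1.0.2.tar.gz/midtools-1.0.2/bin/multiple-significant-base-frequencies.py | sampleIdKey
-- ===== SOURCE A (Python) =====
-- def sampleIdKey(id_):
--     """
--     Get a sort key for a sample id.
--
--     @param id_: The C{str} id of a sample. This will normally take the form
--         of DA222 (letters followed by some digits), but may also have trailing
--         non-digits, as in VK211-G.
--     @raise ValueError: If id_ contains a digit that is not followed by
--         characters that are all also digits.
--     @return: A 3-C{tuple} containing the initial C{str} part of id_ then
--         the C{int} suffix, if any (else C{0}), then the trailing C{str}, if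
--         any.
--     """
--     # This is stolen from pyhbv/samples.py
--     prefix = ''
--     value = 0
--     trailing = ''
--
--     state = 'PREFIX'
--
--     for offset, c in enumerate(id_):
--         if state == 'PREFIX':
--             if c.isdigit():
--                 state = 'VALUE'
--                 value = 10 * value + int(c)
--             else:
--                 prefix += c
--         elif state == 'VALUE':
--             if c.isdigit():
--                 value = 10 * value + int(c)
--             else:
--                 state = 'TRAILING'
--                 trailing += c
--         else:
--             trailing += c
--
--     return prefix, value, trailing
-- ===== SOURCE B (Python) =====
-- def _span(s, pred):
--     # Longest prefix of s whose characters all satisfy pred, and the rest.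
--     for i, c in enumerate(s):
--         if not pred(c):
--             return s[:i], s[i:]
--     return s, ''
--
--
-- def sampleIdKey(id_):
--     prefix, rest = _span(id_, lambda c: not c.isdigit())
--     digits, trailing = _span(rest, str.isdigit)
--     value = 0
--     for c in digits:
--         value = value * 10 + ord(c) - ord('0')
--     return prefix, value, trailing
-- ===== Notes on version B (the rewrite author's own statement) =====
-- stated objective: simpler
-- what changed: Replaces A's three-state per-character state machine (which grows prefix/trailing strings and switches states) by two span scans that split the id into prefix / digit run / trailing slices, followed by a plain base-10 fold over the digit slice.
import Mathlib
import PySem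

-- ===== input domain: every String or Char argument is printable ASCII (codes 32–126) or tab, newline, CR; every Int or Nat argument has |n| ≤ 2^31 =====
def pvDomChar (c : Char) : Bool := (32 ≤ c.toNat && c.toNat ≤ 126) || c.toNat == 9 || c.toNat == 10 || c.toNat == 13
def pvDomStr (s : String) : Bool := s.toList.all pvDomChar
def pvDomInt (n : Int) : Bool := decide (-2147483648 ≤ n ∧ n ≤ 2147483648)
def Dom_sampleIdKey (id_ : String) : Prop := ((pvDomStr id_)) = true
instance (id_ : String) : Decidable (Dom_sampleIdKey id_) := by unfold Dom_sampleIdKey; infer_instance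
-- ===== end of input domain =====

-- B replaces A's three-state character state machine by two span scans that split the id
-- into prefix / digit run / trailing, then a plain base-10 fold over the digit run (simpler).

-- ===== PORT A =====
-- One step of A's for-loop; the state 'PREFIX'/'VALUE'/'TRAILING' is encoded 0/1/2.
-- int(c) is ported as (PySem.Int.ofChars? [c]).getD 0: the branch guard PySem.Chars.isdigit c
-- guarantees ofChars? [c] = some, so the default is never used (exact on Dom).
def pvStepA (st : List Char × Int × List Char × Nat) (c : Char) : List Char × Int × List Char × Nat :=
  let (pre, value, trailing, state) := st
  if state = 0 then
    if PySem.Chars.isdigit c then (pre, 10 * value + (PySem.Int.ofChars? [c]).getD 0, trailing, 1)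
    else (pre ++ [c], value, trailing, 0)
  else if state = 1 then
    if PySem.Chars.isdigit c then (pre, 10 * value + (PySem.Int.ofChars? [c]).getD 0, trailing, 1)
    else (pre, value, trailing ++ [c], 2)
  else (pre, value, trailing ++ [c], 2)

def sampleIdKey (id_ : String) : String × Int × String :=
  let r := id_.toList.foldl pvStepA ([], 0, [], 0)
  (String.ofList r.1, r.2.1, String.ofList r.2.2.1)

-- ===== PORT B =====
-- Source B's _span helper: longest prefix whose characters satisfy pred, and the rest
def pvSpanB (pred : Char → Bool) (s : List Char) : List Char × List Char :=
  match s with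
  | [] => ([], [])
  | c :: cs => if pred c then let (a, b) := pvSpanB pred cs; (c :: a, b) else ([], c :: cs)

-- ord(c) - ord('0') is c.toNat - 48 (as Int, exactly as Python computes it)
def sampleIdKey_alt (id_ : String) : String × Int × String :=
  let (pre, rest) := pvSpanB (fun c => !PySem.Chars.isdigit c) id_.toList
  let (digits, trailing) := pvSpanB (fun c => PySem.Chars.isdigit c) rest
  let value := digits.foldl (fun v c => v * 10 + ((c.toNat : Int) - 48)) 0
  (String.ofList pre, value, String.ofList trailing)

-- ===== PRECONDITION & SPEC =====
def Spec_sampleIdKey (id_ : String) (out : String × Int × String) : Prop := out = sampleIdKey_alt id_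
instance (id_ : String) (out : String × Int × String) : Decidable (Spec_sampleIdKey id_ out) := by unfold Spec_sampleIdKey; infer_instance

-- ===== CLAIM (what is proved, stated in full; the proofs are below) =====
def Claim_equal_sampleIdKey : Prop := ∀ (id_ : String), Dom_sampleIdKey id_ → Spec_sampleIdKey id_ (sampleIdKey id_)

-- ===== LEMMAS AND PROOFS =====

theorem pvSpanB_eq (p : Char → Bool) (s : List Char) :
    pvSpanB p s = (s.takeWhile p, s.dropWhile p) := by
  induction s with
  | nil => rfl
  | cons c cs ih =>
    simp only [pvSpanB, List.takeWhile, List.dropWhile]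
    cases h : p c <;> simp [ih]

-- int(c) for a character with isdigit c = true (then c is one of '0'..'9')
theorem pvDigitVal (c : Char) (h : PySem.Chars.isdigit c = true) :
    (PySem.Int.ofChars? [c]).getD 0 = (c.toNat : Int) - 48 := by
  simp only [PySem.Chars.isdigit, Bool.and_eq_true, decide_eq_true_eq] at h
  obtain ⟨h1, h2⟩ := h
  have h1' : 48 ≤ c.toNat := h1
  have h2' : c.toNat ≤ 57 := h2
  have hc : c = Char.ofNat c.toNat := by simp [Char.ofNat_toNat]
  interval_cases h3 : c.toNat <;> rw [hc] <;> decide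

-- over a digit run, A's accumulator form equals B's accumulator form
theorem pvDigFold (ds : List Char) (h : ∀ c ∈ ds, PySem.Chars.isdigit c = true) (v : Int) :
    ds.foldl (fun a c => 10 * a + (PySem.Int.ofChars? [c]).getD 0) v
      = ds.foldl (fun a c => a * 10 + ((c.toNat : Int) - 48)) v := by
  induction ds generalizing v with
  | nil => rfl
  | cons c cs ih =>
    simp only [List.foldl]
    rw [pvDigitVal c (h c (by simp)), mul_comm]
    exact ih (fun x hx => h x (by simp [hx])) _

theorem pvFoldA_state2 (cs : List Char) (p t : List Char) (v : Int) :
    cs.foldl pvStepA (p, v, t, 2) = (p, v, t ++ cs, 2) := by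
  induction cs generalizing t with
  | nil => simp
  | cons c cs ih => simp [List.foldl, pvStepA, ih]

theorem pvFoldA_state1 (cs : List Char) (p t : List Char) (v : Int) :
    cs.foldl pvStepA (p, v, t, 1)
      = (p, (cs.takeWhile PySem.Chars.isdigit).foldl
              (fun a c => 10 * a + (PySem.Int.ofChars? [c]).getD 0) v,
          t ++ cs.dropWhile PySem.Chars.isdigit,
          if cs.dropWhile PySem.Chars.isdigit = [] then 1 else 2) := by
  induction cs generalizing v with
  | nil => simp
  | cons c cs ih =>
    simp only [List.foldl, List.takeWhile, List.dropWhile]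
    by_cases h : PySem.Chars.isdigit c = true
    · simp [pvStepA, h, ih]
    · rw [Bool.not_eq_true] at h
      simp [pvStepA, h, pvFoldA_state2]

theorem pvFoldA_state0 (cs : List Char) (p : List Char) :
    cs.foldl pvStepA (p, 0, [], 0)
      = (p ++ cs.takeWhile (fun c => !PySem.Chars.isdigit c),
          ((cs.dropWhile (fun c => !PySem.Chars.isdigit c)).takeWhile PySem.Chars.isdigit).foldl
              (fun a c => 10 * a + (PySem.Int.ofChars? [c]).getD 0) 0,
          (cs.dropWhile (fun c => !PySem.Chars.isdigit c)).dropWhile PySem.Chars.isdigit,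
          if cs.dropWhile (fun c => !PySem.Chars.isdigit c) = [] then 0
          else if (cs.dropWhile (fun c => !PySem.Chars.isdigit c)).dropWhile PySem.Chars.isdigit = [] then 1 else 2) := by
  induction cs generalizing p with
  | nil => simp
  | cons c cs ih =>
    simp only [List.foldl, List.takeWhile, List.dropWhile]
    by_cases h : PySem.Chars.isdigit c = true
    · simp [pvStepA, h, pvFoldA_state1]
    · rw [Bool.not_eq_true] at h
      simp [pvStepA, h, ih]

-- ===== VERDICT (by name: the statement is the Claim_ definition above) =====
theorem sampleIdKey_spec : Claim_equal_sampleIdKey := by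
  intro id_ _
  unfold Spec_sampleIdKey sampleIdKey sampleIdKey_alt
  simp only [pvSpanB_eq, pvFoldA_state0]
  rw [pvDigFold _ (fun c hc => List.mem_takeWhile_imp hc) 0]
  simp
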